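-- pv_equiv track=rewrite | github.com/aaa997/snake_board.py | week7/ex7/ex7.py | _compare_2d_numbers_helper
-- ===== SOURCE A (Python) =====
-- from typing import Any, List
--
-- def _compare_2d_numbers_helper(l1: List[int], l2: List[int], x: int) -> bool:
--     if x < 0:
--         return True
--     if len(l1) != len(l2):
--         return False
--     if (l1[x]) != (l2[x]):
--         return False
--     else:
--         return _compare_2d_numbers_helper(l1, l2, x - 1)
-- ===== SOURCE B (Python) =====
-- def _compare_2d_numbers_helper(l1, l2, x):
--     if x < 0:
--         return True
--     if len(l1) != len(l2):
--         return False
--     return l1[:x + 1] == l2[:x + 1]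
-- ===== Notes on version B (the rewrite author's own statement) =====
-- stated objective: simpler
-- what changed: Replaces the descending index recursion with a single prefix-slice comparison l1[:x+1] == l2[:x+1] after the same two guards.
-- outside the precondition, e.g. on _compare_2d_numbers_helper([1], [1], 3): A raises IndexError, B returns True
import Mathlib
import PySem

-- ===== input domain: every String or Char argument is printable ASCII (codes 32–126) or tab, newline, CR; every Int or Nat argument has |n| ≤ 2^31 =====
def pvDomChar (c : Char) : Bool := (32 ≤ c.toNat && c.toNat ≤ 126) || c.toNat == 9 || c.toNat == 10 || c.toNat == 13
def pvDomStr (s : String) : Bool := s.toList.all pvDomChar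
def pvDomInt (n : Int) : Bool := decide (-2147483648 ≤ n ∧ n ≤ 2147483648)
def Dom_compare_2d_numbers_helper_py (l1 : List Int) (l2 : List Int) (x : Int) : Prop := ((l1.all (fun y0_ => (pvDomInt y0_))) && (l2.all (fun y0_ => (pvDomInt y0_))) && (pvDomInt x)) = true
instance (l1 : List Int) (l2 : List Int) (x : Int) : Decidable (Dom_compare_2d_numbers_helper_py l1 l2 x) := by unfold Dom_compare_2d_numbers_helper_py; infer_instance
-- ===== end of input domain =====

-- B replaces A's descending recursion with the same two guards followed by a single
-- prefix-slice comparison l1[:x+1] == l2[:x+1] (objective: simpler).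

-- ===== PORT A =====
-- literal port of A's recursion; where Python's l1[x] would raise IndexError the
-- pyGet? returns none and .getD 0 fills in — Pre_ excludes exactly those inputs
def compare_2d_numbers_helper_py (l1 : List Int) (l2 : List Int) (x : Int) : Bool :=
  if x < 0 then true
  else if l1.length ≠ l2.length then false
  else if (PySem.List.pyGet? l1 x).getD 0 ≠ (PySem.List.pyGet? l2 x).getD 0 then false
  else compare_2d_numbers_helper_py l1 l2 (x - 1)
termination_by (x + 1).toNat
decreasing_by omega

-- ===== PORT B =====
def compare_2d_numbers_helper_py_alt (l1 : List Int) (l2 : List Int) (x : Int) : Bool :=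
  if x < 0 then true
  else if l1.length ≠ l2.length then false
  else PySem.List.slice l1 none (some (x + 1)) == PySem.List.slice l2 none (some (x + 1))

-- ===== PRECONDITION & SPEC =====
-- Pre_ excludes exactly the inputs where A raises IndexError: 0 ≤ x, equal lengths, x out of range
def Pre_compare_2d_numbers_helper_py (l1 : List Int) (l2 : List Int) (x : Int) : Prop :=
  x < 0 ∨ l1.length ≠ l2.length ∨ x < l1.length
instance (l1 : List Int) (l2 : List Int) (x : Int) : Decidable (Pre_compare_2d_numbers_helper_py l1 l2 x) := by unfold Pre_compare_2d_numbers_helper_py; infer_instance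

def pvWitness_compare_2d_numbers_helper_py : List Int × List Int × Int := ([1, 2, 3], [1, 2, 3], 2)

def Spec_compare_2d_numbers_helper_py (l1 : List Int) (l2 : List Int) (x : Int) (out : Bool) : Prop := out = compare_2d_numbers_helper_py_alt l1 l2 x
instance (l1 : List Int) (l2 : List Int) (x : Int) (out : Bool) : Decidable (Spec_compare_2d_numbers_helper_py l1 l2 x out) := by unfold Spec_compare_2d_numbers_helper_py; infer_instance

-- ===== CLAIM =====
def Claim_equal_compare_2d_numbers_helper_py : Prop := ∀ (l1 : List Int) (l2 : List Int) (x : Int), Dom_compare_2d_numbers_helper_py l1 l2 x → Pre_compare_2d_numbers_helper_py l1 l2 x → Spec_compare_2d_numbers_helper_py l1 l2 x (compare_2d_numbers_helper_py l1 l2 x)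

-- ===== LEMMAS AND PROOFS =====

-- A's recursion at a valid natural index equals the prefix comparison up to that index
theorem compA_take (n : Nat) : ∀ (l1 l2 : List Int), l1.length = l2.length → n < l1.length →
    compare_2d_numbers_helper_py l1 l2 (n : Int) = (l1.take (n + 1) == l2.take (n + 1)) := by
  induction n with
  | zero =>
    intro l1 l2 hlen hlt
    match l1, l2, hlt, hlen with
    | a :: l1', b :: l2', _, hlen =>
      have hneg : compare_2d_numbers_helper_py (a :: l1') (b :: l2') (-1) = true := by
        rw [compare_2d_numbers_helper_py]; simp
      rw [compare_2d_numbers_helper_py]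
      simp only [Int.natCast_zero, PySem.List.pyGet?_zero_cons, Option.getD_some, hlen, ne_eq,
        not_true_eq_false, if_false, List.take]
      by_cases h : a = b
      · subst h; simp [hneg]
      · simp [h]
  | succ n ih =>
    intro l1 l2 hlen hlt
    rw [compare_2d_numbers_helper_py]
    have hx : ¬ ((n + 1 : Nat) : Int) < 0 := by push_cast; omega
    have hstep : ((n + 1 : Nat) : Int) - 1 = (n : Int) := by push_cast; ring
    have hg1 : l1[n + 1]? = some l1[n + 1] := List.getElem?_eq_getElem hlt
    have hg2 : l2[n + 1]? = some l2[n + 1] := List.getElem?_eq_getElem (by omega)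
    simp only [hx, if_false, hlen, ne_eq, not_true_eq_false, hstep,
      PySem.List.pyGet?_natCast, hg1, hg2, Option.getD_some]
    rw [ih l1 l2 hlen (by omega)]
    have hlen' : (l1.take (n + 1)).length = (l2.take (n + 1)).length := by
      simp [List.length_take]; omega
    have key : (l1.take (n + 1) ++ [l1[n + 1]] = l2.take (n + 1) ++ [l2[n + 1]]) ↔
        (l1.take (n + 1) = l2.take (n + 1) ∧ l1[n + 1] = l2[n + 1]) := by
      constructor
      · intro hcon
        refine ⟨List.append_inj_left hcon (by simpa using hlen'), ?_⟩
        have h2 := List.append_inj_right hcon (by simpa using hlen')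
        simpa using h2
      · rintro ⟨h1, h2⟩; rw [h1, h2]
    have t1 : l1.take (n + 1 + 1) = l1.take (n + 1) ++ (l1[n + 1]?).toList := List.take_add_one
    have t2 : l2.take (n + 1 + 1) = l2.take (n + 1) ++ (l2[n + 1]?).toList := List.take_add_one
    rw [t1, t2, hg1, hg2]
    by_cases h : l1[n + 1] = l2[n + 1]
    · simp only [h, not_true_eq_false, if_false]
      rw [h] at key
      rw [Bool.eq_iff_iff]
      simp only [beq_iff_eq, Option.toList_some]
      constructor
      · intro he; rw [he]
      · intro he; exact (key.mp he).1
    · simp only [h, not_false_eq_true, if_true]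
      symm
      rw [beq_eq_false_iff_ne]
      intro hcon
      exact h (key.mp (by simpa using hcon)).2

-- ===== VERDICT =====
theorem compare_2d_numbers_helper_py_spec : Claim_equal_compare_2d_numbers_helper_py := by
  intro l1 l2 x _ hpre
  unfold Spec_compare_2d_numbers_helper_py compare_2d_numbers_helper_py_alt
  by_cases hx : x < 0
  · rw [compare_2d_numbers_helper_py]; simp [hx]
  · by_cases hlen : l1.length = l2.length
    · have hlt : x < l1.length := by
        rcases hpre with h | h | h
        · omega
        · exact absurd hlen h
        · exact h
      have hxn : x = ((x.toNat : Nat) : Int) := by omega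
      have hnlt : x.toNat < l1.length := by omega
      have hcast : ((x.toNat : Nat) : Int) + 1 = ((x.toNat + 1 : Nat) : Int) := by push_cast; ring
      simp only [hx, if_false, hlen, ne_eq, not_true_eq_false]
      rw [hxn, compA_take x.toNat l1 l2 hlen hnlt, hcast,
        PySem.List.slice_to_natCast, PySem.List.slice_to_natCast]
    · rw [compare_2d_numbers_helper_py]; simp [hx, hlen]
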